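-- pv_equiv track=rewrite | github.com/RRG314/RDT-toolbox | tools/benchmark_rdt_index.py | unique_positive_keys
-- ===== SOURCE A (Python) =====
-- from typing import Any, Callable, Dict, Iterable, List, Sequence, Tuple
--
-- def unique_positive_keys(candidates: Iterable[int], n: int) -> List[int]:
--     out: List[int] = []
--     used = set()
--     for raw in candidates:
--         if len(out) >= n:
--             break
--         k = int(raw)
--         if k < 1:
--             k = 1 - k
--         while k in used or k < 1:
--             k += 1
--         used.add(k)
--         out.append(k)
--     return out
-- ===== SOURCE B (Python) =====
-- from typing import Iterable, List
--
-- def unique_positive_keys(candidates: Iterable[int], n: int) -> List[int]: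
--     # A appends exactly one key per processed candidate, so it stops after
--     # min(n, len(candidates)) items: truncate up front and drop the break check.
--     cs = [int(x) for x in candidates]
--     cs = cs[:max(0, min(n, len(cs)))]
--     nxt = {}  # union-find "next free slot": key -> slot s with all of [key, s) taken
--
--     def assign(k: int) -> int:
--         if k < 1:
--             k = 1 - k
--         path = []
--         while k in nxt:
--             path.append(k)
--             k = nxt[k]
--         for v in path:          # path compression
--             nxt[v] = k + 1
--         nxt[k] = k + 1
--         return k
--
--     return [assign(raw) for raw in cs]
-- ===== Notes on version B (the rewrite author's own statement) =====
-- stated objective: alternative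
-- what changed: B truncates the input to the first min(n, len) candidates up front (A's break is provably reached exactly then) and assigns each key with a union-find next-free-pointer dictionary with path compression instead of A's linear probe over a 'used' set.
import Mathlib
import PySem

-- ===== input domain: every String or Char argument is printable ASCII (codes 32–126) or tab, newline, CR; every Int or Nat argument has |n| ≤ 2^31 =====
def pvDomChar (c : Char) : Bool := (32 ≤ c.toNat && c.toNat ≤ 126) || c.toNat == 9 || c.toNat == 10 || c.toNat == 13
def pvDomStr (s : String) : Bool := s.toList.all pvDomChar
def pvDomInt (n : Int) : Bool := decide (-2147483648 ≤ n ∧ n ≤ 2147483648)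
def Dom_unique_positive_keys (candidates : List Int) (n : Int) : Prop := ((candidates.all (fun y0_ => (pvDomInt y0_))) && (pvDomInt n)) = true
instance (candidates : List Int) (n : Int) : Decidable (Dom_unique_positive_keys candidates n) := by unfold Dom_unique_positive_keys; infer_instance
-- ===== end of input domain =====

-- B truncates the input to the first min(n, len) candidates up front (A's break is reached
-- exactly then) and assigns keys via a union-find next-free-pointer dictionary with path
-- compression instead of A's linear probe over a 'used' set (alternative algorithm, same values).

-- ===== PORT A =====
-- Python's `while k in used or k < 1: k += 1`; fuel (|used| + 1 at the call site) is enough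
-- because among |used| + 1 consecutive integers one is outside `used` (proved below).
def pvProbe (used : PySem.Set Int) (k : Int) : Nat → Int
  | 0 => k
  | fuel+1 => if k ∈ used ∨ k < 1 then pvProbe used (k+1) fuel else k

def pvStepA (n : Int) (st : List Int × PySem.Set Int) (raw : Int) : List Int × PySem.Set Int :=
  if (st.1.length : Int) ≥ n then st   -- Python `break`: from here on every step is a no-op
  else
    let k1 := if raw < 1 then 1 - raw else raw
    let k := pvProbe st.2 k1 (st.2.length + 1)
    (st.1 ++ [k], PySem.Set.add st.2 k)

def unique_positive_keys (candidates : List Int) (n : Int) : List Int :=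
  (candidates.foldl (pvStepA n) ([], PySem.Set.empty)).1

-- ===== PORT B =====
-- Python's `while k in nxt: path.append(k); k = nxt[k]`; returns (final k, path).
-- Fuel (nxt.size + 1 at the call site) is enough: the chain visits distinct keys of nxt.
def pvFind (nxt : PySem.Dict Int Int) (k : Int) : Nat → Int × List Int
  | 0 => (k, [])
  | fuel+1 =>
    match nxt.get? k with
    | none => (k, [])
    | some w =>
      let r := pvFind nxt w fuel
      (r.1, k :: r.2)

-- Source B's `assign`: returns the assigned key and the updated pointer dictionary
def pvAssign (nxt : PySem.Dict Int Int) (raw : Int) : Int × PySem.Dict Int Int :=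
  let k1 := if raw < 1 then 1 - raw else raw
  let fr := pvFind nxt k1 (nxt.size + 1)
  let k := fr.1
  let d := (fr.2.foldl (fun d v => d.insert v (k+1)) nxt).insert k (k+1)   -- path compression
  (k, d)

-- Source B's list comprehension `[assign(raw) for raw in cs]` threading the mutated `nxt`
def pvGo : PySem.Dict Int Int → List Int → List Int
  | _, [] => []
  | nxt, raw :: rest =>
    let r := pvAssign nxt raw
    r.1 :: pvGo r.2 rest

def unique_positive_keys_alt (candidates : List Int) (n : Int) : List Int :=
  pvGo PySem.Dict.empty (candidates.take (max 0 (min n (candidates.length : Int))).toNat)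

-- ===== PRECONDITION & SPEC =====
def Spec_unique_positive_keys (candidates : List Int) (n : Int) (out : List Int) : Prop := out = unique_positive_keys_alt candidates n
instance (candidates : List Int) (n : Int) (out : List Int) : Decidable (Spec_unique_positive_keys candidates n out) := by unfold Spec_unique_positive_keys; infer_instance

-- ===== CLAIM (what is proved, stated in full; the proofs are below) =====
def Claim_equal_unique_positive_keys : Prop := ∀ (candidates : List Int) (n : Int), Dom_unique_positive_keys candidates n → Spec_unique_positive_keys candidates n (unique_positive_keys candidates n)

-- ===== LEMMAS AND PROOFS =====

-- m is the least integer ≥ k outside `used`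
def pvIsLF (used : List Int) (k m : Int) : Prop :=
  k ≤ m ∧ m ∉ used ∧ ∀ j, k ≤ j → j < m → j ∈ used

-- relation between A's state (`used`) and B's state (`nxt`)
def pvInv (used : List Int) (nxt : PySem.Dict Int Int) : Prop :=
  nxt.keys = used ∧ used.Nodup ∧ (∀ v ∈ used, 1 ≤ v) ∧
    ∀ k w, nxt.get? k = some w → k < w ∧ ∀ j, k ≤ j → j < w → j ∈ used

theorem pvIsLF_unique {used : List Int} {k m m' : Int}
    (h : pvIsLF used k m) (h' : pvIsLF used k m') : m = m' := by
  obtain ⟨hk, hm, hall⟩ := h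
  obtain ⟨hk', hm', hall'⟩ := h'
  rcases lt_trichotomy m m' with hlt | he | hgt
  · exact absurd (hall' m hk hlt) hm
  · exact he
  · exact absurd (hall m' hk' hgt) hm'

theorem pvProbe_spec (used : List Int) :
    ∀ (fuel : Nat) (k : Int), 1 ≤ k →
      (∃ m, k ≤ m ∧ m < k + (fuel : Int) ∧ m ∉ used) →
      pvIsLF used k (pvProbe used k fuel) := by
  intro fuel
  induction fuel with
  | zero =>
    rintro k hk ⟨m, h1, h2, _⟩
    exfalso; simp at h2; omega
  | succ fuel ih =>
    rintro k hk ⟨m, h1, h2, hm⟩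
    rw [pvProbe]
    by_cases hc : k ∈ used ∨ k < 1
    · have hku : k ∈ used := hc.resolve_right (by omega)
      rw [if_pos hc]
      have hmk : m ≠ k := fun e => hm (e ▸ hku)
      obtain ⟨a, b, c⟩ := ih (k+1) (by omega) ⟨m, by omega, by push_cast at h2 ⊢; omega, hm⟩
      refine ⟨by omega, b, ?_⟩
      intro j hj1 hj2
      by_cases hjk : j = k
      · exact hjk ▸ hku
      · exact c j (by omega) hj2
    · rw [if_neg hc]
      exact ⟨le_refl k, fun h => hc (Or.inl h), fun j h1 h2 => absurd h1 (by omega)⟩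

theorem pvProbe_exists (used : List Int) (hnd : used.Nodup) (k : Int) :
    ∃ m, k ≤ m ∧ m < k + ((used.length : Int) + 1) ∧ m ∉ used := by
  by_contra h
  push_neg at h
  have hnd1 : ((List.range (used.length+1)).map (fun i : Nat => k + (i : Int))).Nodup := by
    refine List.Nodup.map ?_ List.nodup_range
    intro a b hab
    have : k + (a : Int) = k + (b : Int) := hab
    omega
  have hsub : ((List.range (used.length+1)).map (fun i : Nat => k + (i : Int))) ⊆ used := by
    intro x hx
    simp only [List.mem_map, List.mem_range] at hx
    obtain ⟨i, hi, rfl⟩ := hx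
    refine h _ (by omega) ?_
    have : (i : Int) < (used.length : Int) + 1 := by exact_mod_cast Int.ofNat_lt.mpr (by omega)
    omega
  have hle := (List.subperm_of_subset hnd1 hsub).length_le
  simp at hle

theorem pvFind_spec (used : List Int) (nxt : PySem.Dict Int Int) (hInv : pvInv used nxt) :
    ∀ (fuel : Nat) (k : Int),
      (nxt.keys.filter (fun x => decide (k ≤ x))).length < fuel →
      pvIsLF used k (pvFind nxt k fuel).1 ∧
        ∀ v ∈ (pvFind nxt k fuel).2, v ∈ nxt.keys ∧ pvIsLF used v (pvFind nxt k fuel).1 := by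
  obtain ⟨hkeys, hnd, hpos, hent⟩ := hInv
  intro fuel
  induction fuel with
  | zero => intro k h; omega
  | succ fuel ih =>
    intro k hlen
    cases hg : nxt.get? k with
    | none =>
      have hknot : k ∉ used := by
        rw [← hkeys]
        exact (PySem.Dict.get?_eq_none_iff_not_mem_keys nxt k).mp hg
      constructor
      · simp only [pvFind, hg]
        exact ⟨le_refl k, hknot, fun j h1 h2 => absurd h1 (by omega)⟩
      · simp only [pvFind, hg]
        intro v hv; simp at hv
    | some w =>
      have hkmem : k ∈ nxt.keys := by
        by_contra hc
        have hnone := (PySem.Dict.get?_eq_none_iff_not_mem_keys nxt k).mpr hc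
        rw [hnone] at hg; simp at hg
      obtain ⟨hkw, hint⟩ := hent k w hg
      have hmeas : (nxt.keys.filter (fun x => decide (w ≤ x))).length < fuel := by
        have he1 : nxt.keys.filter (fun x => decide (w ≤ x))
            = (nxt.keys.filter (fun x => decide (k ≤ x))).filter (fun x => decide (w ≤ x)) := by
          rw [List.filter_filter]
          apply List.filter_congr
          intro x _
          by_cases hwx : w ≤ x
          · have : k ≤ x := by omega
            simp [hwx, this]
          · simp [hwx]
        have hstrict : ((nxt.keys.filter (fun x => decide (k ≤ x))).filter
            (fun x => decide (w ≤ x))).length < (nxt.keys.filter (fun x => decide (k ≤ x))).length := by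
          rw [List.length_filter_lt_length_iff_exists]
          exact ⟨k, List.mem_filter.mpr ⟨hkmem, by simp⟩, by simp; omega⟩
        rw [he1]
        omega
      obtain ⟨hLF, hpath⟩ := ih w hmeas
      obtain ⟨hwle, hwnot, hwall⟩ := hLF
      have hup : pvIsLF used k (pvFind nxt w fuel).1 := by
        refine ⟨by omega, hwnot, ?_⟩
        intro j hj1 hj2
        by_cases hjw : j < w
        · exact hint j hj1 hjw
        · exact hwall j (by omega) hj2
      constructor
      · simp only [pvFind, hg]
        exact hup
      · simp only [pvFind, hg]
        intro v hv
        rcases List.mem_cons.mp hv with rfl | hv'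
        · exact ⟨hkmem, hup⟩
        · exact hpath v hv'

theorem pv_get?_foldl_insert_const (path : List Int) (d : PySem.Dict Int Int) (c x : Int) :
    ((path.foldl (fun d v => d.insert v c) d).get? x)
      = if x ∈ path then some c else d.get? x := by
  induction path generalizing d with
  | nil => simp
  | cons v rest ih =>
    simp only [List.foldl_cons, ih, List.mem_cons]
    by_cases h1 : x ∈ rest
    · simp [h1]
    · by_cases h2 : x = v <;> simp [h1, h2, PySem.Dict.get?_insert]

theorem pv_keys_foldl_insert_const (path : List Int) (d : PySem.Dict Int Int) (c : Int)
    (h : ∀ v ∈ path, v ∈ d.keys) :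
    (path.foldl (fun d v => d.insert v c) d).keys = d.keys := by
  induction path generalizing d with
  | nil => rfl
  | cons v rest ih =>
    simp only [List.foldl_cons]
    have hv : d.contains v := by
      rw [PySem.Dict.contains_iff_mem_keys]
      exact h v List.mem_cons_self
    have hk : (d.insert v c).keys = d.keys := PySem.Dict.keys_insert_of_contains d c hv
    rw [ih, hk]
    intro u hu; rw [hk]
    exact h u (List.mem_cons_of_mem _ hu)

-- Source B's assign computes the same key as A's probe and preserves the state relation
theorem pvAssign_eq (raw : Int) (used : List Int) (nxt : PySem.Dict Int Int)
    (h : pvInv used nxt) :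
    pvProbe used (if raw < 1 then 1 - raw else raw) (used.length + 1) = (pvAssign nxt raw).1 ∧
      pvInv (used ++ [(pvAssign nxt raw).1]) (pvAssign nxt raw).2 := by
  obtain ⟨hkeys, hnd, hpos, hent⟩ := h
  have hk1 : 1 ≤ (if raw < 1 then 1 - raw else raw) := by split <;> omega
  set k1 := if raw < 1 then 1 - raw else raw with hk1def
  have hA : pvIsLF used k1 (pvProbe used k1 (used.length + 1)) := by
    apply pvProbe_spec used (used.length + 1) k1 hk1
    obtain ⟨m, h1, h2, h3⟩ := pvProbe_exists used hnd k1
    exact ⟨m, h1, by push_cast at h2 ⊢; omega, h3⟩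
  have hsz : (nxt.keys.filter (fun x => decide (k1 ≤ x))).length < nxt.size + 1 := by
    have h1 := List.length_filter_le (fun x => decide (k1 ≤ x)) nxt.keys
    have h2 : nxt.keys.length = nxt.size := by
      simp [PySem.Dict.keys, PySem.Dict.size]
    omega
  obtain ⟨hB, hpath⟩ := pvFind_spec used nxt ⟨hkeys, hnd, hpos, hent⟩ (nxt.size + 1) k1 hsz
  have hkk : pvProbe used k1 (used.length + 1) = (pvFind nxt k1 (nxt.size + 1)).1 :=
    pvIsLF_unique hA hB
  set k := (pvFind nxt k1 (nxt.size + 1)).1 with hkdef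
  obtain ⟨hk1k, hknot, hkall⟩ := hB
  have hassign1 : (pvAssign nxt raw).1 = k := by
    simp only [pvAssign]
    rw [← hk1def]
  have hassign2 : (pvAssign nxt raw).2
      = ((pvFind nxt k1 (nxt.size + 1)).2.foldl (fun d v => d.insert v (k+1)) nxt).insert k (k+1) := by
    simp only [pvAssign]
    rw [← hk1def]
  have hkeysF : ((pvFind nxt k1 (nxt.size + 1)).2.foldl (fun d v => d.insert v (k+1)) nxt).keys
      = nxt.keys :=
    pv_keys_foldl_insert_const _ nxt (k+1) (fun v hv => (hpath v hv).1)
  have hcontk : ((pvFind nxt k1 (nxt.size + 1)).2.foldl (fun d v => d.insert v (k+1)) nxt).contains k = false := by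
    rw [Bool.eq_false_iff]
    intro hc
    rw [PySem.Dict.contains_iff_mem_keys, hkeysF, hkeys] at hc
    exact hknot hc
  have hkeys' : (((pvFind nxt k1 (nxt.size + 1)).2.foldl (fun d v => d.insert v (k+1)) nxt).insert k (k+1)).keys
      = used ++ [k] := by
    rw [PySem.Dict.keys_insert_of_not_contains _ _ hcontk, hkeysF, hkeys]
  have hget : ∀ x, ((((pvFind nxt k1 (nxt.size + 1)).2.foldl (fun d v => d.insert v (k+1)) nxt).insert k (k+1)).get? x)
      = if x = k then some (k+1) else if x ∈ (pvFind nxt k1 (nxt.size + 1)).2 then some (k+1) else nxt.get? x := by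
    intro x
    rw [PySem.Dict.get?_insert, pv_get?_foldl_insert_const]
  refine ⟨hassign1 ▸ hkk, ?_⟩
  rw [hassign1, hassign2]
  refine ⟨hkeys', by
      simp [List.nodup_append, hnd]
      intro a ha h
      exact hknot (h ▸ ha), ?_, ?_⟩
  · intro v hv
    rcases List.mem_append.mp hv with hv' | hv'
    · exact hpos v hv'
    · simp at hv'; omega
  · intro x w hx
    rw [hget x] at hx
    split_ifs at hx with h1 h2
    · cases hx
      subst h1
      exact ⟨by omega, fun j hj1 hj2 => by
        have : j = k := by omega
        subst this; exact List.mem_append.mpr (Or.inr (by simp))⟩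
    · cases hx
      obtain ⟨hxkeys, hxle, _, hxall⟩ := hpath x h2
      have hxused : x ∈ used := hkeys ▸ hxkeys
      refine ⟨by omega, ?_⟩
      intro j hj1 hj2
      by_cases hjk : j < k
      · exact List.mem_append.mpr (Or.inl (hxall j hj1 hjk))
      · have : j = k := by omega
        subst this; exact List.mem_append.mpr (Or.inr (by simp))
    · obtain ⟨hxw, hxall⟩ := hent x w hx
      exact ⟨hxw, fun j hj1 hj2 => List.mem_append.mpr (Or.inl (hxall j hj1 hj2))⟩

-- once A's break condition holds, the rest of A's fold is a no-op
theorem pvStepA_id (n : Int) : ∀ (cs out : List Int) (used : PySem.Set Int),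
    (out.length : Int) ≥ n →
    (cs.foldl (pvStepA n) (out, used)).1 = out := by
  intro cs
  induction cs with
  | nil => intro out used _; rfl
  | cons raw rest ih =>
    intro out used hg
    simp only [List.foldl_cons, pvStepA, if_pos hg]
    exact ih out used hg

theorem pvLoop_eq (n : Int) : ∀ (cs out used : List Int) (nxt : PySem.Dict Int Int),
    pvInv used nxt →
    (cs.foldl (pvStepA n) (out, (used : PySem.Set Int))).1
      = out ++ pvGo nxt (cs.take (n - out.length).toNat) := by
  intro cs
  induction cs with
  | nil => intro out used nxt _; simp [pvGo]
  | cons raw rest ih =>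
    intro out used nxt hInv
    by_cases hg : (out.length : Int) ≥ n
    · have h0 : (n - (out.length : Int)).toNat = 0 := by omega
      rw [h0]
      simp only [List.take_zero, pvGo, List.append_nil]
      exact pvStepA_id n (raw :: rest) out used hg
    · have h1 : (n - (out.length : Int)).toNat = (n - (out.length : Int) - 1).toNat + 1 := by omega
      obtain ⟨hkey, hinv'⟩ := pvAssign_eq raw used nxt hInv
      set k := (pvAssign nxt raw).1 with hk
      have hknot : k ∉ used := by
        obtain ⟨hkeys', hnd', _, _⟩ := hinv'
        intro hc
        simp [List.nodup_append] at hnd'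
        exact hnd'.2 k hc rfl
      have hstepA : pvStepA n (out, (used : PySem.Set Int)) raw = (out ++ [k], ((used ++ [k] : List Int) : PySem.Set Int)) := by
        simp only [pvStepA, if_neg hg]
        have hadd : PySem.Set.add (used : PySem.Set Int) k = used ++ [k] := by
          simp [PySem.Set.add, PySem.Set.contains, hknot]
        rw [hkey, hadd]
      rw [h1, List.foldl_cons, hstepA, List.take_succ_cons]
      simp only [pvGo]
      rw [ih (out ++ [k]) (used ++ [k]) (pvAssign nxt raw).2 hinv']
      simp only [List.append_assoc, List.cons_append, List.nil_append]
      congr 3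
      simp
      omega

theorem pv_take_clamp (c : List Int) (n : Int) :
    c.take (max 0 (min n (c.length : Int))).toNat = c.take n.toNat := by
  by_cases h : n ≤ 0
  · have h1 : (max 0 (min n (c.length : Int))).toNat = 0 := by omega
    have h2 : n.toNat = 0 := by omega
    rw [h1, h2]
  · by_cases h3 : n ≤ (c.length : Int)
    · have : max 0 (min n (c.length : Int)) = n := by omega
      rw [this]
    · have h4 : (max 0 (min n (c.length : Int))).toNat = c.length := by omega
      rw [h4, List.take_length]
      exact (List.take_of_length_le (by omega)).symm

-- ===== VERDICT (by name: the statement is the Claim_ definition above) =====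
theorem unique_positive_keys_spec : Claim_equal_unique_positive_keys := by
  intro candidates n _
  show unique_positive_keys candidates n = unique_positive_keys_alt candidates n
  unfold unique_positive_keys unique_positive_keys_alt
  rw [show (PySem.Set.empty : PySem.Set Int) = (([] : List Int) : PySem.Set Int) from rfl,
      pvLoop_eq n candidates [] [] PySem.Dict.empty
      ⟨rfl, List.nodup_nil, by simp, by intro k w hk; simp [PySem.Dict.get?_empty] at hk⟩]
  rw [pv_take_clamp]
  simp
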